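-- pv_equiv track=rewrite | github.com/Akinesia112/Neural-Audio-Watermarking-Codec-Interpretability-Explainability | interpretability_research/scripts/run_snac_layer_ablation.py | generate_masks
-- ===== SOURCE A (Python) =====
-- from typing import List, Dict
--
-- def generate_masks(num_layers: int) -> Dict[str, List[int]]:
--     """
--     產生一組實驗用 mask：
--       - full: [1,1,1,1]
--       - drop_last_k: 從最後一層開始清零
--       - keep_only_k: 只留某一層
--     """
--     masks = {}
--     full = [1] * num_layers
--     masks["full_all"] = full
--
--     # 逐步 drop fine layers
--     for k in range(1, num_layers + 1):
--         m = full.copy()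
--         # 把最後 k 個 set 0
--         for i in range(num_layers - k, num_layers):
--             m[i] = 0
--         masks[f"drop_last_{k}"] = m
--
--     # 只留單一 layer
--     for i in range(num_layers):
--         m = [0] * num_layers
--         m[i] = 1
--         masks[f"keep_only_{i}"] = m
--
--     return masks
-- ===== SOURCE B (Python) =====
-- def generate_masks(num_layers):
--     n = num_layers
--     masks = {"full_all": [1] * n}
--     # Running drop mask: one O(1) in-place update per step, snapshot each time,
--     # instead of rebuilding from full and zeroing a suffix with an inner loop.
--     m = [1] * n
--     for k in range(1, n + 1):
--         m[n - k] = 0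
--         masks[f"drop_last_{k}"] = m.copy()
--     # Running one-hot buffer: set the bit, snapshot, clear it again.
--     z = [0] * n
--     for i in range(n):
--         z[i] = 1
--         masks[f"keep_only_{i}"] = z.copy()
--         z[i] = 0
--     return masks
-- ===== Notes on version B (the rewrite author's own statement) =====
-- stated objective: alternative
-- what changed: B keeps a single running mask across loop iterations, performing one O(1) in-place update per step and snapshotting it (loop-carried state), instead of A's per-iteration rebuild of the mask from scratch with an inner suffix-zeroing loop; the keep_only masks likewise reuse one running zero buffer (set bit, snapshot, clear bit).
import Mathlib
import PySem

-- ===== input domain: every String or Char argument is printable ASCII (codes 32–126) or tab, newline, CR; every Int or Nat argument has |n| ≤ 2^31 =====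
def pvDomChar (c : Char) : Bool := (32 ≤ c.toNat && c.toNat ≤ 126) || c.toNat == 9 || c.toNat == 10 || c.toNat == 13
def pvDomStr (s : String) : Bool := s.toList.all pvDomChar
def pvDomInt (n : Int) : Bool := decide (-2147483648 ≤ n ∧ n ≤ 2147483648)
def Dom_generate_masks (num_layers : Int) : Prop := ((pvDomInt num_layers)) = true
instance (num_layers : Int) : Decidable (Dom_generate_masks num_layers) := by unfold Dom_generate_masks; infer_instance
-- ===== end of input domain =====

-- B keeps one running mask with an O(1) in-place update + snapshot per iteration (loop-carried
-- state) instead of A's per-iteration rebuild with an inner suffix-zeroing loop; same cost overall.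

-- ===== PORT A =====
-- masks is a Python dict (PySem.Dict, insertion order); m[i] = 0 is ported as List.set i.toNat:
-- exact here because every assigned index i satisfies 0 ≤ num_layers - k ≤ i < num_layers = len m.
def generate_masks (num_layers : Int) : List (String × List Int) :=
  let masks : PySem.Dict String (List Int) := PySem.Dict.empty
  let full : List Int := PySem.List.pyRepeat [1] num_layers
  let masks := masks.insert "full_all" full
  let masks := (PySem.List.pyRange 1 (num_layers + 1) 1).foldl (fun masks k =>
    let m := (PySem.List.pyRange (num_layers - k) num_layers 1).foldl
      (fun m i => m.set i.toNat 0) full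
    masks.insert ("drop_last_" ++ PySem.Int.toStr k) m) masks
  let masks := (PySem.List.pyRange 0 num_layers 1).foldl (fun masks i =>
    let m := (PySem.List.pyRepeat [0] num_layers).set i.toNat 1
    masks.insert ("keep_only_" ++ PySem.Int.toStr i) m) masks
  masks.items

-- ===== PORT B =====
-- B threads the running buffer through each loop as the second component of the fold state;
-- m[n-k] = 0 / z[i] = 1 / z[i] = 0 become List.set (index provably in range), m.copy() is the
-- snapshot inserted into the dict.
def generate_masks_alt (num_layers : Int) : List (String × List Int) :=
  let n := num_layers
  let masks : PySem.Dict String (List Int) :=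
    PySem.Dict.empty.insert "full_all" (PySem.List.pyRepeat [1] n)
  let s1 := (PySem.List.pyRange 1 (n + 1) 1).foldl
    (fun (s : PySem.Dict String (List Int) × List Int) k =>
      let m := s.2.set (n - k).toNat 0
      (s.1.insert ("drop_last_" ++ PySem.Int.toStr k) m, m))
    (masks, PySem.List.pyRepeat [1] n)
  let s2 := (PySem.List.pyRange 0 n 1).foldl
    (fun (s : PySem.Dict String (List Int) × List Int) i =>
      let z1 := s.2.set i.toNat 1
      (s.1.insert ("keep_only_" ++ PySem.Int.toStr i) z1, z1.set i.toNat 0))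
    (s1.1, PySem.List.pyRepeat [0] n)
  s2.1.items

-- ===== PRECONDITION & SPEC =====
def Spec_generate_masks (num_layers : Int) (out : List (String × List Int)) : Prop := out = generate_masks_alt num_layers
instance (num_layers : Int) (out : List (String × List Int)) : Decidable (Spec_generate_masks num_layers out) := by unfold Spec_generate_masks; infer_instance

-- ===== CLAIM (what is proved, stated in full; the proofs are below) =====
def Claim_equal_generate_masks : Prop := ∀ (num_layers : Int), Dom_generate_masks num_layers → Spec_generate_masks num_layers (generate_masks num_layers)

-- ===== LEMMAS AND PROOFS =====

-- the drop_last_k mask in closed form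
def pvDropMaskCF (n k : Int) : List Int :=
  List.replicate (n - k).toNat 1 ++ List.replicate k.toNat 0

-- A's inner zeroing loop writes a block of zeros
theorem pvFoldlSetZero (d : Nat) : ∀ (a : Int) (m : List Int), 0 ≤ a → a.toNat + d ≤ m.length →
    (PySem.List.pyRange a (a + d) 1).foldl (fun m i => m.set i.toNat 0) m
      = m.take a.toNat ++ List.replicate d 0 ++ m.drop (a.toNat + d) := by
  induction d with
  | zero =>
    intro a m ha hlen
    rw [PySem.List.pyRange_one_eq_nil (by omega)]
    simp
  | succ d ih =>
    intro a m ha hlen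
    rw [PySem.List.pyRange_one_cons (by omega)]
    simp only [List.foldl_cons]
    have h1 : a + ((d + 1 : Nat) : Int) = (a + 1) + (d : Int) := by push_cast; ring
    rw [h1, ih (a + 1) (m.set a.toNat 0) (by omega) (by simp; omega)]
    have h2 : (a + 1).toNat = a.toNat + 1 := by omega
    rw [h2, List.drop_set_of_lt (by omega), List.take_set]
    have h3 : (m.take (a.toNat + 1)).set a.toNat 0 = m.take a.toNat ++ [0] := by
      rw [List.set_eq_take_append_cons_drop, if_pos (by simp; omega),
        List.take_take, List.drop_take]
      simp
    rw [h3]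
    simp [List.replicate_succ]
    omega

-- A's rebuilt drop mask equals the closed form
theorem pvDropMaskA (n k : Int) (h1 : 1 ≤ k) (h2 : k ≤ n) :
    (PySem.List.pyRange (n - k) n 1).foldl (fun m i => m.set i.toNat 0)
        (List.replicate n.toNat (1 : Int))
      = pvDropMaskCF n k := by
  have hn : n = (n - k) + (k.toNat : Int) := by omega
  have h := pvFoldlSetZero k.toNat (n - k) (List.replicate n.toNat (1 : Int)) (by omega)
    (by simp; omega)
  rw [← hn] at h
  refine h.trans ?_
  rw [List.take_replicate, List.drop_replicate]
  have ha : min (n - k).toNat n.toNat = (n - k).toNat := by omega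
  rw [ha]
  have hb : n.toNat - ((n - k).toNat + k.toNat) = 0 := by omega
  simp [hb, pvDropMaskCF]

-- one O(1) update advances the running drop mask
theorem pvDropStep (n k : Int) (h1 : 1 ≤ k) (h2 : k ≤ n) :
    (pvDropMaskCF n (k - 1)).set (n - k).toNat 0 = pvDropMaskCF n k := by
  unfold pvDropMaskCF
  have ha : (n - (k - 1)).toNat = (n - k).toNat + 1 := by omega
  rw [ha, List.set_append_left _ _ (by simp),
    List.set_eq_take_append_cons_drop, if_pos (by simp),
    List.take_replicate, List.drop_replicate]
  have hb : min (n - k).toNat ((n - k).toNat + 1) = (n - k).toNat := by omega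
  have hc : k.toNat = (k - 1).toNat + 1 := by omega
  rw [hb, hc]
  simp [List.replicate_succ]

-- B's first fold: the dict accumulates exactly the closed-form masks
theorem pvDropFoldB (n : Int) (d : Nat) : ∀ (a : Int) (masks : PySem.Dict String (List Int)),
    1 ≤ a → a + (d : Int) = n + 1 →
    ((PySem.List.pyRange a (n + 1) 1).foldl
      (fun (s : PySem.Dict String (List Int) × List Int) k =>
        let m := s.2.set (n - k).toNat 0
        (s.1.insert ("drop_last_" ++ PySem.Int.toStr k) m, m))
      (masks, pvDropMaskCF n (a - 1))).1
    = (PySem.List.pyRange a (n + 1) 1).foldl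
        (fun masks k => masks.insert ("drop_last_" ++ PySem.Int.toStr k) (pvDropMaskCF n k))
        masks := by
  induction d with
  | zero =>
    intro a masks _h1 _h2
    rw [PySem.List.pyRange_one_eq_nil (by omega)]
    rfl
  | succ d ih =>
    intro a masks h1 h2
    rw [PySem.List.pyRange_one_cons (by omega)]
    simp only [List.foldl_cons]
    rw [pvDropStep n a h1 (by omega)]
    have := ih (a + 1) (masks.insert ("drop_last_" ++ PySem.Int.toStr a) (pvDropMaskCF n a))
      (by omega) (by push_cast at h2 ⊢; omega)
    rwa [show a + 1 - 1 = a from by ring] at this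

-- the running one-hot buffer is restored after each snapshot
theorem pvKeepRestore (n i : Int) (h1 : 0 ≤ i) (h2 : i < n) :
    ((List.replicate n.toNat (0 : Int)).set i.toNat 1).set i.toNat 0
      = List.replicate n.toNat 0 := by
  rw [List.set_set]
  exact List.set_replicate_self

-- B's second fold: the restored buffer makes each snapshot independent
theorem pvKeepFoldB (n : Int) : ∀ (is : List Int) (masks : PySem.Dict String (List Int)),
    (∀ i ∈ is, 0 ≤ i ∧ i < n) →
    (is.foldl
      (fun (s : PySem.Dict String (List Int) × List Int) i =>
        let z1 := s.2.set i.toNat 1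
        (s.1.insert ("keep_only_" ++ PySem.Int.toStr i) z1, z1.set i.toNat 0))
      (masks, List.replicate n.toNat 0)).1
    = is.foldl
        (fun masks i =>
          masks.insert ("keep_only_" ++ PySem.Int.toStr i)
            ((List.replicate n.toNat (0 : Int)).set i.toNat 1))
        masks := by
  intro is
  induction is with
  | nil => intro masks _; rfl
  | cons i is ih =>
    intro masks hmem
    simp only [List.foldl_cons]
    rw [pvKeepRestore n i (hmem i (by simp)).1 (hmem i (by simp)).2]
    exact ih _ (fun j hj => hmem j (by simp [hj]))

-- ===== VERDICT (by name: the statement is the Claim_ definition above) =====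
theorem generate_masks_spec : Claim_equal_generate_masks := by
  intro n _
  unfold Spec_generate_masks
  simp only [generate_masks, generate_masks_alt, PySem.List.pyRepeat_singleton]
  by_cases hn : 0 ≤ n
  · -- A's rebuilt masks and B's running masks both equal the closed form
    have hA : (PySem.List.pyRange 1 (n + 1) 1).foldl (fun masks k =>
          masks.insert ("drop_last_" ++ PySem.Int.toStr k)
            ((PySem.List.pyRange (n - k) n 1).foldl (fun m i => m.set i.toNat 0)
              (List.replicate n.toNat (1 : Int))))
          (PySem.Dict.empty.insert "full_all" (List.replicate n.toNat (1 : Int)))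
        = (PySem.List.pyRange 1 (n + 1) 1).foldl (fun masks k =>
            masks.insert ("drop_last_" ++ PySem.Int.toStr k) (pvDropMaskCF n k))
          (PySem.Dict.empty.insert "full_all" (List.replicate n.toNat (1 : Int))) := by
      refine PySem.List.foldl_congr_mem _ _ _ _ ?_
      intro masks k hk
      rw [PySem.List.mem_pyRange_one] at hk
      rw [pvDropMaskA n k (by omega) (by omega)]
    have hB : (List.replicate n.toNat (1 : Int)) = pvDropMaskCF n 0 := by
      simp [pvDropMaskCF]
    have hD := pvDropFoldB n n.toNat 1
      (PySem.Dict.empty.insert "full_all" (pvDropMaskCF n 0)) (by omega) (by omega)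
    rw [show (1 : Int) - 1 = 0 from by ring] at hD
    rw [hA, hB, hD,
      pvKeepFoldB n (PySem.List.pyRange 0 n 1) _
        (fun i hi => by rw [PySem.List.mem_pyRange_one] at hi; omega)]
  · -- n < 0: both ranges are empty and both sides are just the full_all entry
    rw [PySem.List.pyRange_one_eq_nil (show n + 1 ≤ 1 by omega),
      PySem.List.pyRange_one_eq_nil (show n ≤ 0 by omega)]
    rfl
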